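-- pv_equiv track=rewrite | github.com/Arkist1/advent_of_code_2023 | day 2/main.py | part_2
-- ===== SOURCE A (Python) =====
-- def get_power(args):
--     res = 1
--     for x in args:
--         res = res * x
--
--     return res
--
-- def part_2(parsed_input):
--     pow = []
--     for index, game in parsed_input.items():
--         max_clr = {}
--         for set in game:
--             for colour, amt in set.items():
--                 if not colour in max_clr.keys():
--                     max_clr[colour] = amt
--                 else:
--                     if max_clr[colour] < amt:
--                         max_clr[colour] = amt
--
--         pow.append(get_power(max_clr.values()))
--
--     return pow
-- ===== SOURCE B (Python) =====
-- def game_power(game):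
--     # colour-major: flatten all (colour, amount) pairs, then for each distinct
--     # colour scan the flat list for its maximum; product is order-independent.
--     pairs = [p for s in game for p in s.items()]
--     power = 1
--     for colour in dict.fromkeys(c for c, _ in pairs):
--         power *= max(a for c, a in pairs if c == colour)
--     return power
--
-- def part_2(parsed_input):
--     return [game_power(game) for game in parsed_input.values()]
-- ===== Notes on version B (the rewrite author's own statement) =====
-- stated objective: alternative
-- what changed: B drops A's running-max dictionary entirely: per game it flattens all (colour, amount) pairs into one list, takes the distinct colours, and for each colour rescans the flat list to take its max (colour-major nested scan, quadratic per game, relying on commutativity of the product), instead of A's single set-major pass maintaining a dict of running maxima.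
import Mathlib
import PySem

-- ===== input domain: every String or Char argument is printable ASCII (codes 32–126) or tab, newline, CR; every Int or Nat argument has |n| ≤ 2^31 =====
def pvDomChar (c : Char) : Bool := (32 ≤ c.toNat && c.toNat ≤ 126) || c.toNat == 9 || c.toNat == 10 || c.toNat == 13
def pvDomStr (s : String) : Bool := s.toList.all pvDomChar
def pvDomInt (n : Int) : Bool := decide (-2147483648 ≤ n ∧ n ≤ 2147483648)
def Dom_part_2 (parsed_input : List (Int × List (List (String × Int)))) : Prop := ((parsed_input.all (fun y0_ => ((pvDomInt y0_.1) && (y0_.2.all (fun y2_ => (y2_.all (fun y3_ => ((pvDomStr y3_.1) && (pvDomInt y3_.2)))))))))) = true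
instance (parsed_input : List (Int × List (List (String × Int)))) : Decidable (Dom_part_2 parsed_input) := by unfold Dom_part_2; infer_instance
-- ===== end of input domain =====

-- B replaces A's running-max dictionary by a colour-major nested scan: flatten each game's
-- pairs, then for each distinct colour rescan the flat list for its maximum; alternative, not faster.

-- ===== PORT A =====
def get_power (args : List Int) : Int := args.foldl (fun res x => res * x) 1

def part_2 (parsed_input : List (Int × List (List (String × Int)))) : List Int :=
  (PySem.Dict.ofList parsed_input).items.foldl (fun pow ig =>
    let max_clr := ig.2.foldl (fun mc s =>
      (PySem.Dict.ofList s).items.foldl (fun mc ca =>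
        if mc.contains ca.1 = false then mc.insert ca.1 ca.2
        else if mc.getD ca.1 0 < ca.2 then mc.insert ca.1 ca.2 else mc) mc)
      PySem.Dict.empty
    pow ++ [get_power max_clr.values]) []

-- ===== PORT B =====
def game_power (game : List (List (String × Int))) : Int :=
  let pairs := game.flatMap (fun s => (PySem.Dict.ofList s).items)
  -- max(...): the generator is nonempty because colour occurs in pairs; .getD 0 only totalises
  (PySem.List.dedup (pairs.map Prod.fst)).foldl (fun power colour =>
    power * (PySem.List.max? ((pairs.filter (fun p => p.1 == colour)).map Prod.snd) (fun x => x)).getD 0) 1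

def part_2_alt (parsed_input : List (Int × List (List (String × Int)))) : List Int :=
  (PySem.Dict.ofList parsed_input).values.map game_power

-- ===== PRECONDITION & SPEC =====
def Spec_part_2 (parsed_input : List (Int × List (List (String × Int)))) (out : List Int) : Prop := out = part_2_alt parsed_input
instance (parsed_input : List (Int × List (List (String × Int)))) (out : List Int) : Decidable (Spec_part_2 parsed_input out) := by unfold Spec_part_2; infer_instance

-- ===== CLAIM (what is proved, stated in full; the proofs are below) =====
def Claim_equal_part_2 : Prop := ∀ (parsed_input : List (Int × List (List (String × Int)))), Dom_part_2 parsed_input → Spec_part_2 parsed_input (part_2 parsed_input)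

-- ===== LEMMAS AND PROOFS =====

-- A's per-pair update step
def stepA (mc : PySem.Dict String Int) (ca : String × Int) : PySem.Dict String Int :=
  if mc.contains ca.1 = false then mc.insert ca.1 ca.2
  else if mc.getD ca.1 0 < ca.2 then mc.insert ca.1 ca.2 else mc

-- the amounts recorded for colour c among the flattened pairs
def amts (c : String) (l : List (String × Int)) : List Int :=
  (l.filter (fun p => p.1 == c)).map (·.2)

theorem foldl_nest {α β γ : Type} (l : List α) (g : α → List β) (f : γ → β → γ) (init : γ) :
    l.foldl (fun acc x => (g x).foldl f acc) init = (l.flatMap g).foldl f init := by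
  induction l generalizing init with
  | nil => rfl
  | cons h t ih => simp [List.foldl_append, ih]

theorem keys_stepA (d : PySem.Dict String Int) (ca : String × Int) :
    (stepA d ca).keys = PySem.Set.add d.keys ca.1 := by
  have hc : PySem.Set.contains d.keys ca.1 = d.contains ca.1 := by
    rw [PySem.Dict.contains_eq_decide_mem_keys]
    simp [PySem.Set.contains]
  unfold stepA
  by_cases hb : d.contains ca.1 = true
  · have hm : ca.1 ∈ d.keys := by
      have h1 := hc.trans hb
      simpa [PySem.Set.contains] using h1
    rw [if_neg (by simp [hb])]
    have hadd : PySem.Set.add d.keys ca.1 = d.keys := by simp [PySem.Set.add, hm]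
    rw [hadd]
    split_ifs
    · exact PySem.Dict.keys_insert_of_contains _ _ hb
    · rfl
  · have hb0 : d.contains ca.1 = false := by simpa using hb
    have hm : ca.1 ∉ d.keys := by
      have h1 := hc.trans hb0
      simpa [PySem.Set.contains] using h1
    rw [if_pos hb0]
    have hadd : PySem.Set.add d.keys ca.1 = d.keys ++ [ca.1] := by simp [PySem.Set.add, hm]
    rw [hadd]
    exact PySem.Dict.keys_insert_of_not_contains _ _ hb0

theorem keysA (l : List (String × Int)) :
    ∀ (d : PySem.Dict String Int),
    (l.foldl stepA d).keys = (l.map Prod.fst).foldl PySem.Set.add d.keys := by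
  induction l with
  | nil => intro d; rfl
  | cons p t ih =>
    intro d
    simp only [List.foldl_cons, List.map_cons, ih, keys_stepA]

theorem getA (l : List (String × Int)) :
    ∀ (d : PySem.Dict String Int) (c : String),
      (∀ v, d.get? c = some v → (l.foldl stepA d).get? c = some ((amts c l).foldl max v)) ∧
      (d.get? c = none → (l.foldl stepA d).get? c =
        (match amts c l with | [] => none | a :: t => some (t.foldl max a))) := by
  induction l with
  | nil => intro d c; simp [amts]
  | cons p t ih =>
    intro d c
    by_cases hkc : p.1 = c
    · have hfilter : amts c (p :: t) = p.2 :: amts c t := by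
        simp [amts, hkc]
      constructor
      · intro v hv
        have hcont : d.contains c = true := by
          rw [PySem.Dict.contains_eq_isSome_get?, hv]; rfl
        have hgd : d.getD c 0 = v := PySem.Dict.getD_of_get?_eq_some _ _ hv
        have hstep : stepA d p = if v < p.2 then d.insert c p.2 else d := by
          unfold stepA
          rw [hkc, hcont, hgd]
          simp
        simp only [List.foldl_cons, hfilter, hstep]
        by_cases hlt : v < p.2
        · rw [if_pos hlt]
          have h2 := (ih (d.insert c p.2) c).1 p.2 (PySem.Dict.get?_insert_self _ _ _)
          rw [h2, max_eq_right (le_of_lt hlt)]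
        · rw [if_neg hlt]
          have h2 := (ih d c).1 v hv
          rw [h2, max_eq_left (by omega)]
      · intro hv
        have hcont : d.contains c = false := by
          rw [PySem.Dict.contains_eq_isSome_get?, hv]; rfl
        have hstep : stepA d p = d.insert c p.2 := by
          unfold stepA
          rw [hkc, hcont]
          simp
        simp only [List.foldl_cons, hfilter, hstep]
        have h2 := (ih (d.insert c p.2) c).1 p.2 (PySem.Dict.get?_insert_self _ _ _)
        rw [h2]
    · have hfilter : amts c (p :: t) = amts c t := by
        simp [amts, hkc]
      have hget : (stepA d p).get? c = d.get? c := by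
        unfold stepA
        split_ifs <;> first | rw [PySem.Dict.get?_insert_of_ne _ _ (fun h => hkc h.symm)] | rfl
      constructor
      · intro v hv
        simp only [List.foldl_cons, hfilter]
        exact (ih (stepA d p) c).1 v (by rw [hget, hv])
      · intro hv
        simp only [List.foldl_cons, hfilter]
        exact (ih (stepA d p) c).2 (by rw [hget, hv])

theorem core (l : List (String × Int)) :
    get_power ((l.foldl stepA PySem.Dict.empty).values)
      = (PySem.List.dedup (l.map Prod.fst)).foldl (fun power c =>
          power * (PySem.List.max? (amts c l) (fun x => x)).getD 0) 1 := by
  have hkeys : (l.foldl stepA PySem.Dict.empty).keys = PySem.Set.ofList (l.map Prod.fst) := by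
    rw [keysA, PySem.Dict.keys_empty, PySem.Set.ofList_eq_foldl]
  have hnodup : (l.foldl stepA PySem.Dict.empty).keys.Nodup := by
    rw [hkeys]; exact PySem.Set.nodup_ofList _
  have hget : ∀ c, c ∈ l.map Prod.fst →
      (l.foldl stepA PySem.Dict.empty).getD c 0 = (PySem.List.max? (amts c l) (fun x => x)).getD 0 := by
    intro c hm
    have hne : amts c l ≠ [] := by
      obtain ⟨p, hp, hpc⟩ := List.mem_map.mp hm
      have : p ∈ l.filter (fun p => p.1 == c) := List.mem_filter.mpr ⟨hp, by simp [hpc]⟩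
      simp only [amts, ne_eq, List.map_eq_nil_iff]
      intro hnil
      rw [hnil] at this
      exact List.not_mem_nil this
    obtain ⟨a, t, hat⟩ := List.exists_cons_of_ne_nil hne
    have h0 := (getA l PySem.Dict.empty c).2 (PySem.Dict.get?_empty c)
    rw [hat] at h0
    rw [hat, PySem.List.max?_id_cons, Option.getD_some]
    exact PySem.Dict.getD_of_get?_eq_some _ _ h0
  rw [PySem.Dict.values_eq_map_keys _ hnodup 0, hkeys]
  unfold get_power
  rw [List.foldl_map, PySem.List.dedup_eq_ofList]
  apply PySem.List.foldl_congr_mem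
  intro acc c hcmem
  rw [hget c ((PySem.Set.mem_ofList _ _).mp hcmem)]

theorem game_eq (game : List (List (String × Int))) :
    get_power ((game.flatMap (fun s => (PySem.Dict.ofList s).items)).foldl stepA PySem.Dict.empty).values
      = game_power game := by
  unfold game_power
  exact core _

-- ===== VERDICT (by name: the statement is the Claim_ definition above) =====
theorem part_2_spec : Claim_equal_part_2 := by
  intro pi _
  unfold Spec_part_2 part_2 part_2_alt
  rw [PySem.List.foldl_append_singleton_eq_map]
  simp only [List.nil_append, PySem.Dict.values]
  rw [List.map_map]
  apply List.map_congr_left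
  intro ig _
  simp only [Function.comp]
  rw [foldl_nest _ _ _ PySem.Dict.empty]
  exact game_eq ig.2
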